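-- pv_equiv track=rewrite | github.com/AdamOtto/Daily-Challenges | Challenge224.py | Solution
-- ===== SOURCE A (Python) =====
-- def Solution(ar):
--     l = len(ar)
--     retVal = 1
--     for i in range(0, l):
--         if ar[i] <= retVal:
--             retVal = retVal + ar[i]
--         else:
--             break
--     return retVal
-- ===== SOURCE B (Python) =====
-- def Solution(ar):
--     # pass 1: prefix-sum table, prefix[i] = sum(ar[:i])
--     prefix = [0]
--     for x in ar:
--         prefix.append(prefix[-1] + x)
--     # pass 2: find the first break point
--     for i in range(len(ar)):
--         if ar[i] > 1 + prefix[i]: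
--             return 1 + prefix[i]
--     return 1 + prefix[len(ar)]
-- ===== Notes on version B (the rewrite author's own statement) =====
-- stated objective: alternative
-- what changed: Replaces the inline running accumulator with a two-pass structure: first build a prefix-sum table, then scan for the first index where the element exceeds 1 + prefix and return 1 + prefix there (or 1 + total).
import Mathlib
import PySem

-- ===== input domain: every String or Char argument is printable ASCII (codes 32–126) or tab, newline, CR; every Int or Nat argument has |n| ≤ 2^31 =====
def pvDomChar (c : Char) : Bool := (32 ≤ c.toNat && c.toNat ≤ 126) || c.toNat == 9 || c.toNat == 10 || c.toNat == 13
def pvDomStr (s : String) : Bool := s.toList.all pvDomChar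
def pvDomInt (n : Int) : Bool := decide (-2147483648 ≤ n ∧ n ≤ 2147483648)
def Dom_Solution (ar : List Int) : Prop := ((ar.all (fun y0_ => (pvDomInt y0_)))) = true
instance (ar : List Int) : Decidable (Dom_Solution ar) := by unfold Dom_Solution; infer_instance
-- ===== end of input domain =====

-- B replaces A's inline running accumulator by a two-pass structure (prefix-sum table, then
-- break-point scan); alternative decomposition of the same O(n) task, return value identical.

-- ===== PORT A =====
-- A's loop with early break: recursion over the list carrying retVal
def SolutionLoop (ar : List Int) (retVal : Int) : Int :=
  match ar with
  | [] => retVal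
  | a :: rest => if a ≤ retVal then SolutionLoop rest (retVal + a) else retVal

def Solution (ar : List Int) : Int := SolutionLoop ar 1

-- ===== PORT B =====
-- pass 1 of Source B: prefix = [0]; for x in ar: prefix.append(prefix[-1] + x)
def pvPrefix (ar : List Int) : List Int :=
  ar.foldl (fun p x => p ++ [(p.getLast?.getD 0) + x]) [0]

-- pass 2 of Source B: first i with ar[i] > 1 + prefix[i] (walking ar and prefix together);
-- fall-through returns 1 + prefix[len(ar)]
def pvFind (ar pre : List Int) : Int :=
  match ar, pre with
  | a :: rest, p :: ps => if a > 1 + p then 1 + p else pvFind rest ps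
  | [], p :: _ => 1 + p
  | _, [] => 1   -- unreachable: pre always one longer than ar

def Solution_alt (ar : List Int) : Int := pvFind ar (pvPrefix ar)

-- ===== PRECONDITION & SPEC =====
def Spec_Solution (ar : List Int) (out : Int) : Prop := out = Solution_alt ar
instance (ar : List Int) (out : Int) : Decidable (Spec_Solution ar out) := by unfold Spec_Solution; infer_instance

-- ===== CLAIM (what is proved, stated in full; the proofs are below) =====
def Claim_equal_Solution : Prop := ∀ (ar : List Int), Dom_Solution ar → Spec_Solution ar (Solution ar)

-- ===== LEMMAS AND PROOFS =====

-- running sums starting from c: sums c [a,b,…] = [c+a, c+a+b, …]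
def pvSums (c : Int) : List Int → List Int
  | [] => []
  | a :: rest => (c + a) :: pvSums (c + a) rest

theorem pvPrefix_foldl_eq (ar : List Int) : ∀ (acc : List Int) (c : Int),
    acc.getLast?.getD 0 = c →
    ar.foldl (fun p x => p ++ [(p.getLast?.getD 0) + x]) acc = acc ++ pvSums c ar := by
  induction ar with
  | nil => intro acc c _; simp [pvSums]
  | cons a rest ih =>
      intro acc c hc
      simp only [List.foldl_cons, pvSums]
      rw [hc, ih (acc ++ [c + a]) (c + a) (by simp)]
      simp

theorem pvPrefix_eq (ar : List Int) : pvPrefix ar = 0 :: pvSums 0 ar := by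
  simpa using pvPrefix_foldl_eq ar [0] 0 (by simp)

theorem pvFind_sums (ar : List Int) : ∀ (c : Int),
    pvFind ar (c :: pvSums c ar) = SolutionLoop ar (1 + c) := by
  induction ar with
  | nil => intro c; simp [pvFind, SolutionLoop]
  | cons a rest ih =>
      intro c
      simp only [pvSums, pvFind, SolutionLoop]
      by_cases h : a ≤ 1 + c
      · rw [if_neg (by omega), if_pos h, ih (c + a)]
        ring_nf
      · rw [if_pos (by omega), if_neg h]

-- ===== VERDICT (by name: the statement is the Claim_ definition above) =====
theorem Solution_spec : Claim_equal_Solution := by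
  intro ar _
  unfold Spec_Solution Solution Solution_alt
  rw [pvPrefix_eq, pvFind_sums]
  norm_num
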